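-- pv_equiv track=rewrite | github.com/toberge/advent-of-code | 2020/07/part_one.py | _inner_counter
-- ===== SOURCE A (Python) =====
-- from itertools import chain
--
-- def _inner_counter(target, bags, found):
--     """Find the bags that can contain this one and are not present in found"""
--     if target not in bags:
--         return
--     neighbours = bags[target]
--     yield from neighbours
--     yield from chain.from_iterable(
--         _inner_counter(nxt, bags, found.union(neighbours))
--         for nxt in neighbours
--         if nxt not in found
--     )
-- ===== SOURCE B (Python) =====
-- def _inner_counter(target, bags, found):
--     """Find the bags that can contain this one and are not present in found"""
--     stack = [(target, found)]
--     while stack: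
--         node, fnd = stack.pop()
--         if node not in bags:
--             continue
--         neighbours = bags[node]
--         yield from neighbours
--         newfound = fnd.union(neighbours)
--         for nxt in reversed([n for n in neighbours if n not in fnd]):
--             stack.append((nxt, newfound))
-- ===== Notes on version B (the rewrite author's own statement) =====
-- stated objective: alternative
-- what changed: The recursive generator is replaced by an iterative DFS with an explicit stack of (node, found) frames, pushing eligible children in reverse so the exact pre-order yield sequence is preserved.
import Mathlib
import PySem

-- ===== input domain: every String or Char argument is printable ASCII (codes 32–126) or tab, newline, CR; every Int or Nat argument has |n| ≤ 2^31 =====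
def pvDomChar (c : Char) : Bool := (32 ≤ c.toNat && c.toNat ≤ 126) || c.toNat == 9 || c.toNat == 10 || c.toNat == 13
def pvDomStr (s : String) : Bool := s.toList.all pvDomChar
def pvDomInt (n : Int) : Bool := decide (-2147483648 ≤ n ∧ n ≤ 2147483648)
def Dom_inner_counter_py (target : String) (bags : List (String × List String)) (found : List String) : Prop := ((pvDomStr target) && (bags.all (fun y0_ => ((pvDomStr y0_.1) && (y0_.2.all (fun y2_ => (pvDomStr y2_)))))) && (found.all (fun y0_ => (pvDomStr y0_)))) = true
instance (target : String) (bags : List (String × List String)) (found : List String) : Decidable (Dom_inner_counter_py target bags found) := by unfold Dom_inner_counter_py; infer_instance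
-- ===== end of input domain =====

-- B replaces the recursive generator by an iterative DFS with an explicit stack of
-- (node, found) frames (same pre-order sequence); objective: alternative decomposition.

-- ===== PORT A =====
-- Recursive generator: yield neighbours, then recurse into the unseen neighbours with
-- found ∪ neighbours.  The fuel argument only makes the recursion structural; any fuel
-- ≥ bags.length + 1 gives the value the Python computes (proved by innerA_stable below).
def innerA (bags : List (String × List String)) : Nat → String → List String → List String
  | 0, _, _ => []
  | fuel + 1, target, found =>
    match (PySem.Dict.mk bags).get? target with
    | none => []
    | some neighbours =>
      neighbours ++
        (neighbours.filter (fun nxt => !(PySem.Set.contains found nxt))).flatMap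
          (fun nxt => innerA bags fuel nxt (PySem.Set.union found neighbours))

def inner_counter_py (target : String) (bags : List (String × List String)) (found : List String) : List String :=
  innerA bags (bags.length + 1) target found

-- ===== PORT B =====
-- Iterative DFS: pop a frame, yield its neighbours, push the eligible children in
-- reverse so they are processed in original order.  fuel is only a totality guard.
def innerB (bags : List (String × List String)) : Nat → List (String × List String) → List String → List String
  | _, [], acc => acc
  | 0, _, acc => acc
  | fuel + 1, (node, fnd) :: rest, acc =>
    match (PySem.Dict.mk bags).get? node with
    | none => innerB bags fuel rest acc
    | some neighbours =>
      innerB bags fuel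
        (((neighbours.filter (fun nxt => !(PySem.Set.contains fnd nxt))).map
            (fun nxt => (nxt, PySem.Set.union fnd neighbours))) ++ rest)
        (acc ++ neighbours)

def inner_counter_py_alt (target : String) (bags : List (String × List String)) (found : List String) : List String :=
  innerB bags (((bags.map (fun p => p.2.length)).sum + 2) ^ (bags.length + 2)) [(target, found)] []

-- ===== PRECONDITION & SPEC =====
def Spec_inner_counter_py (target : String) (bags : List (String × List String)) (found : List String) (out : List String) : Prop := out = inner_counter_py_alt target bags found
instance (target : String) (bags : List (String × List String)) (found : List String) (out : List String) : Decidable (Spec_inner_counter_py target bags found out) := by unfold Spec_inner_counter_py; infer_instance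

-- ===== CLAIM (what is proved, stated in full; the proofs are below) =====
def Claim_equal_inner_counter_py : Prop := ∀ (target : String) (bags : List (String × List String)) (found : List String), Dom_inner_counter_py target bags found → Spec_inner_counter_py target bags found (inner_counter_py target bags found)

-- ===== LEMMAS AND PROOFS =====

-- number of dict keys not yet in found (the recursion depth measure)
def mK (bags : List (String × List String)) (found : List String) : Nat :=
  ((bags.map Prod.fst).toFinset.filter (fun k => k ∉ found)).card

-- weight of a stack frame / of a stack (the loop's termination measure)
def base (bags : List (String × List String)) : Nat := (bags.map (fun p => p.2.length)).sum + 2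

def frameW (bags : List (String × List String)) (p : String × List String) : Nat :=
  if ((PySem.Dict.mk bags).get? p.1).isSome then base bags ^ (mK bags p.2 + 1) else 1

def sumW (bags : List (String × List String)) (stack : List (String × List String)) : Nat :=
  (stack.map (frameW bags)).sum

theorem flatMap_congr {α β : Type} {l : List α} {f g : α → List β}
    (h : ∀ x ∈ l, f x = g x) : l.flatMap f = l.flatMap g := by
  induction l with
  | nil => rfl
  | cons a t ih =>
    simp only [List.flatMap_cons]
    rw [h a (by simp), ih (fun x hx => h x (by simp [hx]))]

theorem innerA_nonkey {bags : List (String × List String)} {c : String}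
    (h : (PySem.Dict.mk bags).get? c = none) (F : Nat) (f : List String) :
    innerA bags F c f = [] := by
  cases F with
  | zero => rfl
  | succ n => simp [innerA, h]

theorem mem_values_of_get? {bags : List (String × List String)} {k : String} {v : List String}
    (h : (PySem.Dict.mk bags).get? k = some v) : v ∈ bags.map Prod.snd := by
  induction bags with
  | nil => simp [PySem.Dict.get?] at h
  | cons p rest ih =>
    rw [show (PySem.Dict.mk (p :: rest)) = PySem.Dict.mk ((p.1, p.2) :: rest) by rfl,
      PySem.Dict.get?_mk_cons] at h
    by_cases he : p.1 == k
    · simp [he] at h; simp [h]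
    · simp [he] at h; simp [ih h]

theorem mK_union_lt {bags : List (String × List String)} {f nb : List String} {c : String}
    (hk : ((PySem.Dict.mk bags).get? c).isSome) (hnf : c ∉ f) (hnb : c ∈ nb) :
    mK bags (PySem.Set.union f nb) < mK bags f := by
  apply Finset.card_lt_card
  constructor
  · intro x hx
    simp only [Finset.mem_filter, PySem.Set.mem_union] at hx ⊢
    exact ⟨hx.1, fun hf => hx.2 (Or.inl hf)⟩
  · intro hsub
    have hck : c ∈ (bags.map Prod.fst).toFinset := by
      rcases Option.isSome_iff_exists.mp hk with ⟨v, hv⟩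
      have := PySem.Dict.get?_eq_none_iff_not_mem_keys (d := PySem.Dict.mk bags) (k := c)
      by_contra hc
      have : (PySem.Dict.mk bags).get? c = none := by
        apply this.mpr
        simpa [PySem.Dict.keys_mk, List.mem_toFinset] using hc
      simp [this] at hv
    have h1 : c ∈ (bags.map Prod.fst).toFinset.filter (fun k => k ∉ f) := by
      simp [Finset.mem_filter, hck, hnf]
    have h2 := hsub h1
    simp only [Finset.mem_filter, PySem.Set.mem_union] at h2
    exact h2.2 (Or.inr hnb)

theorem innerA_stable (bags : List (String × List String)) :
    ∀ m f, mK bags f = m → ∀ c F F', m + 1 ≤ F → m + 1 ≤ F' →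
      innerA bags F c f = innerA bags F' c f := by
  intro m
  induction m using Nat.strong_induction_on with
  | _ m ih =>
    intro f hm c F F' hF hF'
    obtain ⟨F₀, rfl⟩ : ∃ k, F = k + 1 := ⟨F - 1, by omega⟩
    obtain ⟨F₀', rfl⟩ : ∃ k, F' = k + 1 := ⟨F' - 1, by omega⟩
    simp only [innerA]
    cases hg : (PySem.Dict.mk bags).get? c with
    | none => rfl
    | some nb =>
      simp only []
      congr 1
      apply flatMap_congr
      intro c' hc'
      simp only [List.mem_filter, Bool.not_eq_eq_eq_not, Bool.not_true] at hc'
      have hcf : c' ∉ f := by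
        intro hm
        have h2 := (PySem.Set.contains_iff (s := f) (x := c')).mpr hm
        rw [hc'.2] at h2
        exact Bool.false_ne_true h2
      cases hgc : (PySem.Dict.mk bags).get? c' with
      | none => rw [innerA_nonkey hgc, innerA_nonkey hgc]
      | some v =>
        have hlt : mK bags (PySem.Set.union f nb) < m := by
          rw [← hm]
          exact mK_union_lt (by simp [hgc]) hcf hc'.1
        exact ih _ hlt _ rfl _ _ _ (by omega) (by omega)

theorem frameW_pos (bags : List (String × List String)) (p : String × List String) :
    1 ≤ frameW bags p := by
  unfold frameW
  split
  · exact Nat.one_le_pow _ _ (by unfold base; omega)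
  · omega

theorem innerB_eq (bags : List (String × List String)) :
    ∀ F stack acc, sumW bags stack ≤ F →
      innerB bags F stack acc =
        acc ++ stack.flatMap (fun p => innerA bags (mK bags p.2 + 1) p.1 p.2) := by
  intro F
  induction F with
  | zero =>
    intro stack acc h
    cases stack with
    | nil => simp [innerB]
    | cons p rest =>
      exfalso
      have := frameW_pos bags p
      simp only [sumW, List.map_cons, List.sum_cons] at h
      omega
  | succ F ih =>
    intro stack acc h
    cases stack with
    | nil => simp [innerB]
    | cons p rest =>
      obtain ⟨n, f⟩ := p
      simp only [sumW, List.map_cons, List.sum_cons] at h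
      cases hg : (PySem.Dict.mk bags).get? n with
      | none =>
        simp only [innerB, hg]
        rw [ih rest acc (by
          have : frameW bags (n, f) = 1 := by simp [frameW, hg]
          simp only [sumW]; omega)]
        simp [innerA_nonkey hg]
      | some nb =>
        have hW : frameW bags (n, f) = base bags ^ (mK bags f + 1) := by
          simp [frameW, hg]
        have hnb_len : nb.length ≤ base bags - 2 := by
          have hmem := mem_values_of_get? hg
          have : nb.length ≤ ((bags.map Prod.snd).map List.length).sum :=
            List.le_sum_of_mem (List.mem_map_of_mem hmem)
          have heq : (bags.map Prod.snd).map List.length = bags.map (fun p => p.2.length) := by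
            simp [List.map_map, Function.comp]
          rw [heq] at this
          unfold base
          omega
        set f' := PySem.Set.union f nb with hf'
        set children := nb.filter (fun nxt => !(PySem.Set.contains f nxt)) with hch
        have hchW : ∀ q ∈ children.map (fun nxt => (nxt, f')), frameW bags q ≤ base bags ^ mK bags f := by
          intro q hq
          rcases List.mem_map.mp hq with ⟨c, hc, rfl⟩
          simp only [hch, List.mem_filter, Bool.not_eq_eq_eq_not, Bool.not_true] at hc
          have hcf : c ∉ f := by
            intro hm
            have h2 := (PySem.Set.contains_iff (s := f) (x := c)).mpr hm
            rw [hc.2] at h2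
            exact Bool.false_ne_true h2
          have hfw : frameW bags (c, f') =
              if ((PySem.Dict.mk bags).get? c).isSome then base bags ^ (mK bags f' + 1) else 1 := rfl
          rw [hfw]
          split
          · next hk =>
            have hlt : mK bags f' < mK bags f := mK_union_lt hk hcf hc.1
            exact Nat.pow_le_pow_right (by unfold base; omega) (by omega)
          · exact Nat.one_le_pow _ _ (by unfold base; omega)
        have hsum_children : sumW bags (children.map (fun nxt => (nxt, f'))) ≤
            (base bags - 2) * base bags ^ mK bags f := by
          calc sumW bags (children.map (fun nxt => (nxt, f')))
              ≤ (children.map (fun nxt => (nxt, f'))).length * (base bags ^ mK bags f) := by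
                have := List.sum_le_card_nsmul ((children.map (fun nxt => (nxt, f'))).map (frameW bags))
                  (base bags ^ mK bags f) (by
                    intro x hx
                    rcases List.mem_map.mp hx with ⟨q, hq, rfl⟩
                    exact hchW q hq)
                simpa [sumW, smul_eq_mul, Nat.mul_comm] using this
            _ ≤ (base bags - 2) * base bags ^ mK bags f := by
                apply Nat.mul_le_mul_right
                calc (children.map (fun nxt => (nxt, f'))).length = children.length := by simp
                  _ ≤ nb.length := by simpa [hch] using List.length_filter_le _ nb
                  _ ≤ base bags - 2 := hnb_len
        have hfuel : sumW bags ((children.map (fun nxt => (nxt, f'))) ++ rest) ≤ F := by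
          have hsplit : sumW bags ((children.map (fun nxt => (nxt, f'))) ++ rest) =
              sumW bags (children.map (fun nxt => (nxt, f'))) + sumW bags rest := by
            simp [sumW]
          have hbpos : 2 ≤ base bags := by unfold base; omega
          have hpow : 1 ≤ base bags ^ mK bags f := Nat.one_le_pow _ _ (by omega)
          have hb : base bags ^ (mK bags f + 1) = base bags * base bags ^ mK bags f := by
            ring
          have : (base bags - 2) * base bags ^ mK bags f + 2 * base bags ^ mK bags f =
              base bags * base bags ^ mK bags f := by
            have : base bags - 2 + 2 = base bags := by omega
            calc (base bags - 2) * base bags ^ mK bags f + 2 * base bags ^ mK bags f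
                = (base bags - 2 + 2) * base bags ^ mK bags f := by ring
              _ = base bags * base bags ^ mK bags f := by rw [this]
          simp only [sumW] at hsplit hsum_children ⊢
          omega
        simp only [innerB, hg]
        rw [ih _ _ hfuel]
        -- now compute A's one step
        have hA : innerA bags (mK bags f + 1) n f =
            nb ++ children.flatMap (fun c => innerA bags (mK bags f) c f') := by
          simp only [innerA, hg, hch, hf']
        rw [List.flatMap_cons, hA]
        have hstep : (children.map (fun nxt => (nxt, f'))).flatMap
              (fun p => innerA bags (mK bags p.2 + 1) p.1 p.2) =
            children.flatMap (fun c => innerA bags (mK bags f) c f') := by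
          rw [List.flatMap_map]
          apply flatMap_congr
          intro c hc
          show innerA bags (mK bags f' + 1) c f' = innerA bags (mK bags f) c f'
          simp only [hch, List.mem_filter, Bool.not_eq_eq_eq_not, Bool.not_true] at hc
          have hcf : c ∉ f := by
            intro hm
            have h2 := (PySem.Set.contains_iff (s := f) (x := c)).mpr hm
            rw [hc.2] at h2
            exact Bool.false_ne_true h2
          cases hgc : (PySem.Dict.mk bags).get? c with
          | none => rw [innerA_nonkey hgc, innerA_nonkey hgc]
          | some v =>
            have hlt : mK bags f' < mK bags f := mK_union_lt (by simp [hgc]) hcf hc.1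
            exact innerA_stable bags (mK bags f') f' rfl c _ _ (by omega) (by omega)
        rw [List.flatMap_append, hstep]
        simp [List.append_assoc]

theorem mK_le (bags : List (String × List String)) (f : List String) :
    mK bags f ≤ bags.length := by
  calc mK bags f ≤ (bags.map Prod.fst).toFinset.card := Finset.card_filter_le _ _
    _ ≤ (bags.map Prod.fst).length := List.toFinset_card_le _
    _ = bags.length := List.length_map _

-- ===== VERDICT (by name: the statement is the Claim_ definition above) =====
theorem inner_counter_py_spec : Claim_equal_inner_counter_py := by
  intro target bags found _
  unfold Spec_inner_counter_py inner_counter_py inner_counter_py_alt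
  have hmk := mK_le bags found
  have hfuel : sumW bags [(target, found)] ≤
      ((bags.map (fun p => p.2.length)).sum + 2) ^ (bags.length + 2) := by
    have h1 : frameW bags (target, found) ≤ base bags ^ (mK bags found + 1) := by
      unfold frameW
      split
      · exact le_refl _
      · exact Nat.one_le_pow _ _ (by unfold base; omega)
    have h2 : base bags ^ (mK bags found + 1) ≤ base bags ^ (bags.length + 2) :=
      Nat.pow_le_pow_right (by unfold base; omega) (by omega)
    have : ((bags.map (fun p => p.2.length)).sum + 2) = base bags := rfl
    rw [this]
    simp only [sumW, List.map_cons, List.map_nil, List.sum_cons, List.sum_nil]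
    omega
  rw [innerB_eq bags _ _ _ hfuel]
  simp only [List.flatMap_cons, List.flatMap_nil, List.nil_append, List.append_nil]
  exact innerA_stable bags (mK bags found) found rfl target _ _ (by omega) (by omega)
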